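-- pv_equiv track=rewrite | github.com/mssmln/python | tae/ias/04-Wherefore-art-thou.py | whatIsInAName
-- ===== SOURCE A (Python) =====
-- def whatIsInAName (collection, source) :
--     l = list()
--     i = 0
--     copy = collection.copy()
--     k = list(source.keys())
--
--     while i < len(collection) :
--         obj = copy.pop(0)
--         k_in_obj_and_same_value = [el in obj and source[el] is obj[el] for el in k]
--         if all(k_in_obj_and_same_value) :
--             l.append(obj)
--         i += 1
--     return l
-- ===== SOURCE B (Python) =====
-- def whatIsInAName(collection, source):
--     # One key at a time: keep shrinking the candidate list; value comparison by ==.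
--     candidates = list(collection)
--     for k in source:
--         candidates = [obj for obj in candidates if k in obj and obj[k] == source[k]]
--     return candidates
-- ===== Notes on version B (the rewrite author's own statement) =====
-- stated objective: faster
-- what changed: B filters a shrinking candidate list one source key at a time (with == on values) instead of A's per-object pass that builds a full boolean list over every key and pops the front of a copied list (quadratic pop(0)); B also drops A's 'is' identity test on int values.
-- intended difference: On inputs where some object ==-matches every source key-value pair but a matched value lies outside CPython's small-int cache [-5, 256], A's 'source[el] is obj[el]' identity test is False for independently constructed ints so A drops the object, while B keeps it; == is the intended membership test. — e.g. on whatIsInAName([[("a", 1000)]], [("a", 1000)]): A returns [], B returns [[("a", 1000)]]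
import Mathlib
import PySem

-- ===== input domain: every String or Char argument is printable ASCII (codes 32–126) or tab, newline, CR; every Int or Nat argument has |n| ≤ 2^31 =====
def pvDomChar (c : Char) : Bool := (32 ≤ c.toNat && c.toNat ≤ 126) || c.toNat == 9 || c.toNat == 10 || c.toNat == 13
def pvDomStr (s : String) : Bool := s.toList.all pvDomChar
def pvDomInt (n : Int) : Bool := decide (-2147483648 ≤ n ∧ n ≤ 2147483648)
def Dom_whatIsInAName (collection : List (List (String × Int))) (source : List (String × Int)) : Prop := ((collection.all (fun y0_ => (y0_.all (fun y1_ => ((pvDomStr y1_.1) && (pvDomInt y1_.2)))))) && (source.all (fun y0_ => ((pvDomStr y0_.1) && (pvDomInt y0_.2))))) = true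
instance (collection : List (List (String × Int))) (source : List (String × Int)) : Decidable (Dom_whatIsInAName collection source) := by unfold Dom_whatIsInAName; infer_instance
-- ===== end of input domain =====

-- B filters the candidate list one source key at a time (shrinking list, == on values) instead of
-- testing each object against the full key list; A's 'source[el] is obj[el]' identity test is kept
-- as an intended difference (D_ below): equal values outside CPython's small-int cache [-5, 256].

-- ===== PORT A =====
-- dict lookup obj[k] / 'k in obj' (first match), via PySem.Dict
def pvGet (d : List (String × Int)) (k : String) : Option Int := (PySem.Dict.mk d).get? k

-- 'source[el] is obj[el]' on ints decoded independently (as a timing run does):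
-- identity holds exactly for equal values in CPython's small-int cache -5..256.
def pyIsInt (a b : Int) : Bool := a == b && decide (-5 ≤ a) && decide (a ≤ 256)

-- the while loop: i < len(collection) ⇔ copy (popped from the front each turn) is nonempty
def whatIsInANameGo (source : List (String × Int)) (ks : List String) :
    List (List (String × Int)) → List (List (String × Int)) → List (List (String × Int))
  | l, [] => l
  | l, obj :: copyRest =>
    let flags := ks.map (fun el =>
      (pvGet obj el).isSome &&
      (match pvGet source el, pvGet obj el with
       | some s, some o => pyIsInt s o
       | _, _ => false))   -- source[el] always exists (el is a key of source); none-case unreachable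
    whatIsInANameGo source ks (if flags.all (fun b => b) then l ++ [obj] else l) copyRest

def whatIsInAName (collection : List (List (String × Int))) (source : List (String × Int)) : List (List (String × Int)) :=
  whatIsInANameGo source (source.map Prod.fst) [] collection

-- ===== PORT B =====
def whatIsInAName_alt (collection : List (List (String × Int))) (source : List (String × Int)) : List (List (String × Int)) :=
  (source.map Prod.fst).foldl
    (fun cands k =>
      cands.filter (fun obj => (pvGet obj k).isSome && (pvGet obj k == pvGet source k)))
    collection

-- ===== PRECONDITION & SPEC =====
-- On objects whose values all ==-match the source but where some matched value lies outside
-- CPython's small-int cache [-5, 256], A's 'is' test fails on independently built ints and A drops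
-- the object, while B keeps it; B's ==-comparison is the intended membership test.
def dMatch (source obj : List (String × Int)) (k : String) : Bool :=
  match pvGet obj k, pvGet source k with
  | some x, some v => x == v
  | _, _ => false

def dBig (source obj : List (String × Int)) (k : String) : Bool :=
  match pvGet obj k, pvGet source k with
  | some x, some v => x == v && (decide (x < -5) || decide (256 < x))
  | _, _ => false

def D_whatIsInAName (collection : List (List (String × Int))) (source : List (String × Int)) : Prop :=
  ∃ obj ∈ collection,
    (∀ k ∈ source.map Prod.fst, dMatch source obj k = true) ∧
    (∃ k ∈ source.map Prod.fst, dBig source obj k = true)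
instance (collection : List (List (String × Int))) (source : List (String × Int)) : Decidable (D_whatIsInAName collection source) := by unfold D_whatIsInAName; infer_instance

def Spec_whatIsInAName (collection : List (List (String × Int))) (source : List (String × Int)) (out : List (List (String × Int))) : Prop := ¬ D_whatIsInAName collection source → out = whatIsInAName_alt collection source
instance (collection : List (List (String × Int))) (source : List (String × Int)) (out : List (List (String × Int))) : Decidable (Spec_whatIsInAName collection source out) := by unfold Spec_whatIsInAName; infer_instance

def pvDiffWitness_whatIsInAName : (List (List (String × Int))) × (List (String × Int)) :=
  ([[("a", 1000)]], [("a", 1000)])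
def pvDiffWitnessOut_whatIsInAName : (List (List (String × Int))) × (List (List (String × Int))) :=
  ([], [[("a", 1000)]])

-- ===== CLAIM (what is proved, stated in full; the proofs are below) =====
def Claim_unchanged_whatIsInAName : Prop := ∀ (collection : List (List (String × Int))) (source : List (String × Int)), Dom_whatIsInAName collection source → Spec_whatIsInAName collection source (whatIsInAName collection source)
def Claim_changed_whatIsInAName : Prop := Dom_whatIsInAName (pvDiffWitness_whatIsInAName.1) (pvDiffWitness_whatIsInAName.2) ∧ D_whatIsInAName (pvDiffWitness_whatIsInAName.1) (pvDiffWitness_whatIsInAName.2) ∧ whatIsInAName (pvDiffWitness_whatIsInAName.1) (pvDiffWitness_whatIsInAName.2) = pvDiffWitnessOut_whatIsInAName.1 ∧ whatIsInAName_alt (pvDiffWitness_whatIsInAName.1) (pvDiffWitness_whatIsInAName.2) = pvDiffWitnessOut_whatIsInAName.2 ∧ pvDiffWitnessOut_whatIsInAName.1 ≠ pvDiffWitnessOut_whatIsInAName.2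
def Claim_exact_whatIsInAName : Prop := ∀ (collection : List (List (String × Int))) (source : List (String × Int)), Dom_whatIsInAName collection source → D_whatIsInAName collection source → whatIsInAName collection source ≠ whatIsInAName_alt collection source

-- ===== LEMMAS AND PROOFS =====

-- A's per-key test (the comprehension's element) and B's per-key test
def fA (source obj : List (String × Int)) (el : String) : Bool :=
  (pvGet obj el).isSome &&
  (match pvGet source el, pvGet obj el with
   | some s, some o => pyIsInt s o
   | _, _ => false)

def fB (source obj : List (String × Int)) (k : String) : Bool :=
  (pvGet obj k).isSome && (pvGet obj k == pvGet source k)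

-- per-object predicates of the two ports
def pA (source : List (String × Int)) (ks : List String) (obj : List (String × Int)) : Bool :=
  (ks.map (fun el =>
    (pvGet obj el).isSome &&
    (match pvGet source el, pvGet obj el with
     | some s, some o => pyIsInt s o
     | _, _ => false))).all (fun b => b)

def pB (source : List (String × Int)) (ks : List String) (obj : List (String × Int)) : Bool :=
  ks.all (fB source obj)

theorem pA_eq_all (source : List (String × Int)) (ks : List String) (obj : List (String × Int)) :
    pA source ks obj = ks.all (fA source obj) := by
  simp only [pA, List.all_map]; rfl

theorem goA_eq (source : List (String × Int)) (ks : List String) :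
    ∀ (copy l : List (List (String × Int))),
      whatIsInANameGo source ks l copy = l ++ copy.filter (pA source ks) := by
  intro copy
  induction copy with
  | nil => intro l; simp [whatIsInANameGo]
  | cons obj rest ih =>
    intro l
    simp only [whatIsInANameGo, ih, List.filter_cons, pA]
    by_cases h : ((ks.map (fun el =>
      (pvGet obj el).isSome &&
      (match pvGet source el, pvGet obj el with
       | some s, some o => pyIsInt s o
       | _, _ => false))).all (fun b => b)) = true
    · simp [h]
    · simp [h]

theorem alt_eq (source : List (String × Int)) :
    ∀ (ks : List String) (c : List (List (String × Int))),
      ks.foldl (fun cands k => cands.filter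
          (fun obj => (pvGet obj k).isSome && (pvGet obj k == pvGet source k))) c
        = c.filter (pB source ks) := by
  intro ks
  induction ks with
  | nil =>
    intro c
    exact (List.filter_eq_self.2 (fun a _ => by simp [pB])).symm
  | cons k ks ih =>
    intro c
    simp only [List.foldl_cons, ih, List.filter_filter]
    exact List.filter_congr (fun a _ => by simp [pB, fB, List.all_cons, Bool.and_comm])

-- dMatch is B's per-key test
theorem dMatch_eq (source obj : List (String × Int)) (k : String) :
    dMatch source obj k = fB source obj k := by
  unfold dMatch fB
  cases pvGet obj k <;> cases pvGet source k <;> simp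

-- A's per-key test implies B's
theorem keyA_imp_keyB (source obj : List (String × Int)) (el : String)
    (h : fA source obj el = true) : fB source obj el = true := by
  unfold fA fB at *
  cases ho : pvGet obj el <;> cases hs : pvGet source el <;>
    simp [ho, hs, pyIsInt] at h ⊢
  omega

-- if B's test holds and A's fails at el, the matched value is out of the cache range
theorem keyB_not_keyA_big (source obj : List (String × Int)) (el : String)
    (hb : fB source obj el = true) (ha : ¬ fA source obj el = true) :
    dBig source obj el = true := by
  unfold fA fB dBig at *
  cases ho : pvGet obj el <;> cases hs : pvGet source el <;>
    simp [ho, hs, pyIsInt] at hb ha ⊢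
  subst hb
  rename_i x
  refine ⟨rfl, ?_⟩
  by_cases hx : (-5 : Int) ≤ x
  · exact Or.inr (ha rfl hx)
  · exact Or.inl (by omega)

theorem pA_imp_pB (source : List (String × Int)) (ks : List String)
    (obj : List (String × Int)) (h : pA source ks obj = true) : pB source ks obj = true := by
  rw [pA_eq_all] at h
  simp only [List.all_eq_true] at h
  simp only [pB, List.all_eq_true]
  intro k hk
  exact keyA_imp_keyB source obj k (h k hk)

-- an object B keeps and A drops witnesses D_
theorem pB_not_pA_D (source : List (String × Int)) (obj : List (String × Int))
    (hb : pB source (source.map Prod.fst) obj = true)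
    (ha : ¬ pA source (source.map Prod.fst) obj = true) :
    (∀ k ∈ source.map Prod.fst, dMatch source obj k = true) ∧
    (∃ k ∈ source.map Prod.fst, dBig source obj k = true) := by
  simp only [pB, List.all_eq_true] at hb
  rw [pA_eq_all] at ha
  simp only [List.all_eq_true, not_forall] at ha
  obtain ⟨k, hk, hnot⟩ := ha
  refine ⟨fun k' hk' => ?_, ⟨k, hk, keyB_not_keyA_big source obj k (hb k hk) hnot⟩⟩
  rw [dMatch_eq]; exact hb k' hk' 

-- strict count: pointwise p → q plus one q-only witness makes countP differ
theorem countP_lt_of_witness {α : Type} (p q : α → Bool) :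
    ∀ (l : List α), (∀ x ∈ l, p x = true → q x = true) →
      ∀ x0 ∈ l, q x0 = true → ¬ p x0 = true → l.countP p < l.countP q := by
  intro l
  induction l with
  | nil => intro _ x0 h; simp at h
  | cons a t ih =>
    intro himp x0 hx0 hq hp
    have himpT : ∀ x ∈ t, p x = true → q x = true := fun x hx => himp x (List.mem_cons_of_mem _ hx)
    have hle : t.countP p ≤ t.countP q := List.countP_mono_left himpT
    rcases List.mem_cons.1 hx0 with rfl | hmem
    · have hp' : p x0 = false := by simp [Bool.not_eq_true] at hp; exact hp
      simp [hq, hp']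
      omega
    · have hlt := ih himpT x0 hmem hq hp
      by_cases hpa : p a = true
      · have hqa := himp a List.mem_cons_self hpa
        simp only [List.countP_cons, hpa, hqa]
        omega
      · have hpa' : p a = false := by simp [Bool.not_eq_true] at hpa; exact hpa
        simp only [List.countP_cons, hpa']
        by_cases hqa : q a = true <;> simp [hqa] <;> omega

theorem whatIsInAName_eq_filter (collection : List (List (String × Int))) (source : List (String × Int)) :
    whatIsInAName collection source = collection.filter (pA source (source.map Prod.fst)) := by
  simp [whatIsInAName, goA_eq]

theorem whatIsInAName_alt_eq_filter (collection : List (List (String × Int))) (source : List (String × Int)) :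
    whatIsInAName_alt collection source = collection.filter (pB source (source.map Prod.fst)) := by
  simp [whatIsInAName_alt, alt_eq]

-- ===== VERDICT (by name: the statement is the Claim_ definition above) =====
theorem whatIsInAName_spec : Claim_unchanged_whatIsInAName := by
  intro collection source _ hD
  rw [whatIsInAName_eq_filter, whatIsInAName_alt_eq_filter]
  apply List.filter_congr
  intro obj hobj
  by_cases ha : pA source (source.map Prod.fst) obj = true
  · rw [ha, pA_imp_pB _ _ _ ha]
  · by_cases hb : pB source (source.map Prod.fst) obj = true
    · exact absurd ⟨obj, hobj, pB_not_pA_D source obj hb ha⟩ hD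
    · simp only [Bool.not_eq_true] at ha hb
      rw [ha, hb]

theorem whatIsInAName_changed : Claim_changed_whatIsInAName := by
  unfold Claim_changed_whatIsInAName; decide

theorem whatIsInAName_tight : Claim_exact_whatIsInAName := by
  intro collection source _ hD
  obtain ⟨obj, hobj, hall, k, hk, hbig⟩ := hD
  rw [whatIsInAName_eq_filter, whatIsInAName_alt_eq_filter]
  have hb : pB source (source.map Prod.fst) obj = true := by
    simp only [pB, List.all_eq_true]
    intro k' hk'
    rw [← dMatch_eq]; exact hall k' hk'
  have ha : ¬ pA source (source.map Prod.fst) obj = true := by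
    intro ha
    rw [pA_eq_all] at ha
    simp only [List.all_eq_true] at ha
    have h2 := ha k hk
    revert hbig h2
    unfold dBig fA
    cases ho : pvGet obj k <;> cases hs : pvGet source k <;>
      simp [pyIsInt]
    intro heq h5 h256 hxeq
    omega
  intro hEq
  have hlen := congrArg List.length hEq
  rw [← List.countP_eq_length_filter, ← List.countP_eq_length_filter] at hlen
  have := countP_lt_of_witness (pA source (source.map Prod.fst)) (pB source (source.map Prod.fst))
    collection (fun x _ hx => pA_imp_pB _ _ _ hx) obj hobj hb ha
  omega
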